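-- pv_equiv track=rewrite | github.com/jeickmeier/rfin | .cursor/skills/dead-code-removal/scripts/find-unused-imports-rust.py | split_grouped_items
-- ===== SOURCE A (Python) =====
-- def split_grouped_items(items_str: str) -> list[str]:
--     """Split comma-separated items in a grouped use, respecting nested braces."""
--     items = []
--     depth = 0
--     current = ""
--     for ch in items_str:
--         if ch == "{":
--             depth += 1
--             current += ch
--         elif ch == "}":
--             depth -= 1
--             current += ch
--         elif ch == "," and depth == 0:
--             items.append(current.strip())
--             current = ""
--         else:
--             current += ch
--     if current.strip():
--         items.append(current.strip())
--     return items
-- ===== SOURCE B (Python) =====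
-- def _top_level_comma(s: str):
--     """Index of the first comma at brace depth 0, or None."""
--     depth = 0
--     for i, ch in enumerate(s):
--         if ch == "{":
--             depth += 1
--         elif ch == "}":
--             depth -= 1
--         elif ch == "," and depth == 0:
--             return i
--     return None
--
--
-- def split_grouped_items(items_str: str) -> list[str]:
--     """Split comma-separated items in a grouped use, respecting nested braces."""
--     parts = []
--     rest = items_str
--     while True:
--         idx = _top_level_comma(rest)
--         if idx is None:
--             break
--         parts.append(rest[:idx].strip())
--         rest = rest[idx + 1:]
--     last = rest.strip()
--     if last:
--         parts.append(last)
--     return parts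
-- ===== Notes on version B (the rewrite author's own statement) =====
-- stated objective: alternative
-- what changed: B replaces A's single fold with a per-character accumulator by a split loop: a helper scans for the next top-level comma, B slices the item off the front and repeats on the remainder.
import Mathlib
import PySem

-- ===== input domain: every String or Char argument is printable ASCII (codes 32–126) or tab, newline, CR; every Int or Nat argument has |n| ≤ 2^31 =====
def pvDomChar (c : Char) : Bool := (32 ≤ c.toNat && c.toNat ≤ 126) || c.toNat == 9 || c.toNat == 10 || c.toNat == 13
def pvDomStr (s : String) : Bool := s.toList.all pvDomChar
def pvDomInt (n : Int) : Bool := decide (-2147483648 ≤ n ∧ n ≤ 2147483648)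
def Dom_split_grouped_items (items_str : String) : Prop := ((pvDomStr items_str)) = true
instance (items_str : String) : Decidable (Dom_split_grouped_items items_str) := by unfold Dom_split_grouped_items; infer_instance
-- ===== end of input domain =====

-- B splits by repeatedly locating the next top-level comma with a helper and slicing the item
-- off the front, instead of A's single fold with a per-character accumulator; objective: alternative.

-- ===== PORT A =====
def pvAstep (st : List (List Char) × Int × List Char) (ch : Char) :
    List (List Char) × Int × List Char :=
  match st with
  | (items, depth, cur) =>
    if ch = '{' then (items, depth + 1, cur ++ [ch])
    else if ch = '}' then (items, depth - 1, cur ++ [ch])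
    else if ch = ',' ∧ depth = 0 then (items ++ [PySem.Chars.strip cur], depth, ([] : List Char))
    else (items, depth, cur ++ [ch])

def split_grouped_items (items_str : String) : List String :=
  (match items_str.toList.foldl pvAstep ([], 0, []) with
   | (items, _, cur) =>
     if PySem.Chars.strip cur ≠ [] then items ++ [PySem.Chars.strip cur] else items).map
    String.ofList

-- ===== PORT B =====
-- _top_level_comma: for-loop over enumerate, transcribed as structural recursion that
-- returns the index of the first depth-0 comma (offsets accumulated via .map (·+1)).
def pvFindComma : List Char → Int → Option Nat
  | [], _ => none
  | ch :: rest, depth =>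
    if ch = '{' then (pvFindComma rest (depth + 1)).map (· + 1)
    else if ch = '}' then (pvFindComma rest (depth - 1)).map (· + 1)
    else if ch = ',' ∧ depth = 0 then some 0
    else (pvFindComma rest depth).map (· + 1)

-- termination fact for the while loop below (cited in decreasing_by)
lemma pvFindComma_lt : ∀ (s : List Char) (d : Int) (i : Nat), pvFindComma s d = some i → i < s.length := by
  intro s
  induction s with
  | nil => intro d i h; simp [pvFindComma] at h
  | cons ch rest ih =>
    intro d i h
    simp only [pvFindComma] at h
    split_ifs at h with h1 h2 h3
    · obtain ⟨j, hj, rfl⟩ := Option.map_eq_some_iff.mp h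
      have := ih _ _ hj; simp only [List.length_cons]; omega
    · obtain ⟨j, hj, rfl⟩ := Option.map_eq_some_iff.mp h
      have := ih _ _ hj; simp only [List.length_cons]; omega
    · injection h with h; subst h; simp
    · obtain ⟨j, hj, rfl⟩ := Option.map_eq_some_iff.mp h
      have := ih _ _ hj; simp only [List.length_cons]; omega

-- the while loop of split_grouped_items; rest[:idx] / rest[idx+1:] with idx a nonnegative
-- in-range index are exactly take idx / drop (idx+1).
def pvSplitLoop (rest : List Char) (parts : List (List Char)) : List (List Char) :=
  match h : pvFindComma rest 0 with
  | some i => pvSplitLoop (rest.drop (i + 1)) (parts ++ [PySem.Chars.strip (rest.take i)])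
  | none =>
    if PySem.Chars.strip rest ≠ [] then parts ++ [PySem.Chars.strip rest] else parts
termination_by rest.length
decreasing_by
  have := pvFindComma_lt rest 0 i h
  simp only [List.length_drop]; omega

def split_grouped_items_alt (items_str : String) : List String :=
  (pvSplitLoop items_str.toList []).map String.ofList

-- ===== PRECONDITION & SPEC =====
def Spec_split_grouped_items (items_str : String) (out : List String) : Prop := out = split_grouped_items_alt items_str
instance (items_str : String) (out : List String) : Decidable (Spec_split_grouped_items items_str out) := by unfold Spec_split_grouped_items; infer_instance

-- ===== CLAIM (what is proved, stated in full; the proofs are below) =====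
def Claim_equal_split_grouped_items : Prop := ∀ (items_str : String), Dom_split_grouped_items items_str → Spec_split_grouped_items items_str (split_grouped_items items_str)

-- ===== LEMMAS AND PROOFS =====

-- When a top-level comma exists at index i, A's fold over s splits there: it records
-- strip (cur ++ s.take i) and restarts with depth 0 and an empty accumulator on s.drop (i+1).
lemma pv_found : ∀ (s : List Char) (depth : Int) (i : Nat), pvFindComma s depth = some i →
    ∀ (items : List (List Char)) (cur : List Char),
    s.foldl pvAstep (items, depth, cur)
      = (s.drop (i + 1)).foldl pvAstep (items ++ [PySem.Chars.strip (cur ++ s.take i)], 0, []) := by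
  intro s
  induction s with
  | nil => intro d i h; simp [pvFindComma] at h
  | cons ch rest ih =>
    intro d i h items cur
    simp only [pvFindComma] at h
    simp only [List.foldl_cons]
    split_ifs at h with h1 h2 h3
    · obtain ⟨j, hj, rfl⟩ := Option.map_eq_some_iff.mp h
      simp only [pvAstep, if_pos h1]
      rw [ih _ _ hj]
      simp
    · obtain ⟨j, hj, rfl⟩ := Option.map_eq_some_iff.mp h
      simp only [pvAstep, if_neg h1, if_pos h2]
      rw [ih _ _ hj]
      simp
    · injection h with h
      subst h
      obtain ⟨hc, hd⟩ := h3
      subst hc hd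
      simp [pvAstep]
    · obtain ⟨j, hj, rfl⟩ := Option.map_eq_some_iff.mp h
      simp only [pvAstep, if_neg h1, if_neg h2, if_neg h3]
      rw [ih _ _ hj]
      simp

-- When no top-level comma exists, A's fold only appends characters: items are unchanged
-- and the accumulator ends as cur ++ s.
lemma pv_none : ∀ (s : List Char) (depth : Int), pvFindComma s depth = none →
    ∀ (items : List (List Char)) (cur : List Char),
    ∃ d' : Int, s.foldl pvAstep (items, depth, cur) = (items, d', cur ++ s) := by
  intro s
  induction s with
  | nil => intro d _ items cur; exact ⟨d, by simp⟩
  | cons ch rest ih =>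
    intro d h items cur
    simp only [pvFindComma] at h
    simp only [List.foldl_cons]
    split_ifs at h with h1 h2 h3
    · simp only [pvAstep, if_pos h1]
      obtain ⟨d', hd'⟩ := ih _ (Option.map_eq_none_iff.mp h) items (cur ++ [ch])
      exact ⟨d', by rw [hd']; simp⟩
    · simp only [pvAstep, if_neg h1, if_pos h2]
      obtain ⟨d', hd'⟩ := ih _ (Option.map_eq_none_iff.mp h) items (cur ++ [ch])
      exact ⟨d', by rw [hd']; simp⟩
    · simp only [pvAstep, if_neg h1, if_neg h2, if_neg h3]
      obtain ⟨d', hd'⟩ := ih _ (Option.map_eq_none_iff.mp h) items (cur ++ [ch])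
      exact ⟨d', by rw [hd']; simp⟩

-- projection form of A's final if (definitionally equal to the match in the port)
def pvFinish (st : List (List Char) × Int × List Char) : List (List Char) :=
  if PySem.Chars.strip st.2.2 ≠ [] then st.1 ++ [PySem.Chars.strip st.2.2] else st.1

-- unfolding equations for the while loop
lemma pvSplitLoop_some (s : List Char) (parts : List (List Char)) (i : Nat)
    (h : pvFindComma s 0 = some i) :
    pvSplitLoop s parts = pvSplitLoop (s.drop (i + 1)) (parts ++ [PySem.Chars.strip (s.take i)]) := by
  rw [pvSplitLoop]
  split
  · rename_i j heq
    rw [h] at heq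
    injection heq with heq
    subst heq
    rfl
  · rename_i heq
    rw [h] at heq
    cases heq

lemma pvSplitLoop_none (s : List Char) (parts : List (List Char))
    (h : pvFindComma s 0 = none) :
    pvSplitLoop s parts
      = if PySem.Chars.strip s ≠ [] then parts ++ [PySem.Chars.strip s] else parts := by
  rw [pvSplitLoop]
  split
  · rename_i j heq
    rw [h] at heq
    cases heq
  · rfl

lemma pv_main : ∀ (n : Nat) (s : List Char), s.length ≤ n → ∀ (parts : List (List Char)),
    pvFinish (s.foldl pvAstep (parts, 0, [])) = pvSplitLoop s parts := by
  intro n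
  induction n with
  | zero =>
    intro s hs parts
    have : s = [] := List.eq_nil_of_length_eq_zero (by omega)
    subst this
    rw [pvSplitLoop_none [] parts rfl]
    simp [pvFinish]
  | succ n ih =>
    intro s hs parts
    cases h : pvFindComma s 0 with
    | some i =>
      rw [pvSplitLoop_some s parts i h, pv_found s 0 i h parts []]
      have hi := pvFindComma_lt s 0 i h
      have : (s.drop (i + 1)).length ≤ n := by simp only [List.length_drop]; omega
      simpa using ih (s.drop (i + 1)) this (parts ++ [PySem.Chars.strip (s.take i)])
    | none =>
      rw [pvSplitLoop_none s parts h]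
      obtain ⟨d', hd'⟩ := pv_none s 0 h parts []
      rw [hd']
      simp [pvFinish]

-- ===== VERDICT (by name: the statement is the Claim_ definition above) =====
theorem split_grouped_items_spec : Claim_equal_split_grouped_items := by
  intro items_str _
  unfold Spec_split_grouped_items split_grouped_items split_grouped_items_alt
  exact congrArg (List.map String.ofList)
    (pv_main items_str.toList.length items_str.toList le_rfl [])
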